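-- pv_equiv track=rewrite | github.com/DominikSLK/aoc-2024 | 2/2.py | is_safe2
-- ===== SOURCE A (Python) =====
-- def distance(a, b):
--     if a < b:
--         return b - a
--     else:
--         return a - b
--
-- def is_dec_or_inc(a):
--     if a[0] < a[-1]:
--         b = list(a)
--         b.sort()
--         if a == b:
--             return True
--         else:
--             return False
--     else:
--         b = list(a)
--         b.sort()
--         b.reverse()
--         if a == b:
--             return True
--         else:
--             return False
--
-- def is_safe(report: list):
--     if not is_dec_or_inc(report):
--         return False
--     for i in range(1, len(report)):
--         if i == len(report):
--             return True
--         dist = distance(report[i-1], report[i])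
--         if dist > 3 or dist < 1:
--             return False
--     return True
--
-- def is_safe2(report: list):
--     if is_safe(report):
--         return True
--     for i in range(len(report)):
--         a = report[:i] + report[i+1:]
--         if is_safe(a):
--             return True
--     return False
-- ===== SOURCE B (Python) =====
-- def _dampened(d, lo, hi):
--     # d is the list of consecutive differences; decide whether all of them can be
--     # brought into [lo, hi] by deleting at most one element of the original report
--     ok = lambda x: lo <= x <= hi
--     i = 0
--     while i < len(d) and ok(d[i]):
--         i += 1
--     if i == len(d):
--         return True
--     c1 = (i == 0 or ok(d[i - 1] + d[i])) and all(ok(x) for x in d[i + 1:])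
--     c2 = i == len(d) - 1 or (ok(d[i] + d[i + 1]) and all(ok(x) for x in d[i + 2:]))
--     return c1 or c2
--
-- def is_safe2(report: list):
--     d = [b - a for a, b in zip(report, report[1:])]
--     return _dampened(d, 1, 3) or _dampened(d, -3, -1)
-- ===== Notes on version B (the rewrite author's own statement) =====
-- stated objective: faster
-- what changed: A retries a full safety check (sort-and-compare monotonicity plus a distance loop) on the list with each of the n elements removed; B builds the consecutive-difference list once and, per direction, does one linear scan that finds the first out-of-band difference and tests only the two removals (of its left or right endpoint) that could repair it.
import Mathlib
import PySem

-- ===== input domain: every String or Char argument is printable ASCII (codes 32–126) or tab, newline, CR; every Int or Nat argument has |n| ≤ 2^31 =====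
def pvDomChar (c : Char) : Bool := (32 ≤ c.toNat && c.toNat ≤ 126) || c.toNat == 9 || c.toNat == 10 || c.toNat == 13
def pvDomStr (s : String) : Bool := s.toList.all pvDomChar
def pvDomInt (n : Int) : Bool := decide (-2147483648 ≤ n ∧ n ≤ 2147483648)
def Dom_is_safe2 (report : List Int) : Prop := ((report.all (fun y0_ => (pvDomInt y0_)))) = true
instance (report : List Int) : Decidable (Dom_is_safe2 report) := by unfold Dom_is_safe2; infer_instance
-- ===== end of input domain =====

-- B replaces A's quadratic try-every-deletion search (each check sorting the list) by one
-- linear scan over the difference list per direction, testing only the two deletions that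
-- can repair the first out-of-band difference (objective: faster).

-- ===== PORT A =====
def pvDistance (a b : Int) : Int := if a < b then b - a else a - b

def pvIsDecOrInc (a : List Int) : Bool :=
  if PySem.List.pyGetD a 0 0 < PySem.List.pyGetD a (-1) 0 then
    decide (a = PySem.List.sorted a (fun x => x) false)
  else
    decide (a = (PySem.List.sorted a (fun x => x) false).reverse)

def pvSafeLoop (report : List Int) : List Int → Bool
  | [] => true
  | i :: rest =>
    if i = (report.length : Int) then true
    else
      let dist := pvDistance (PySem.List.pyGetD report (i - 1) 0) (PySem.List.pyGetD report i 0)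
      if dist > 3 || dist < 1 then false else pvSafeLoop report rest

def pvIsSafe (report : List Int) : Bool :=
  if !pvIsDecOrInc report then false
  else pvSafeLoop report (PySem.List.pyRange 1 report.length 1)

def pvSafe2Loop (report : List Int) : List Int → Bool
  | [] => false
  | i :: rest =>
    if pvIsSafe (PySem.List.slice report none (some i) ++ PySem.List.slice report (some (i + 1)) none) then true
    else pvSafe2Loop report rest

def is_safe2 (report : List Int) : Bool :=
  if pvIsSafe report then true
  else pvSafe2Loop report (PySem.List.pyRange 0 report.length 1)

-- ===== PORT B =====
def pvOk (lo hi x : Int) : Bool := decide (lo ≤ x) && decide (x ≤ hi)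

-- the while loop of _dampened: index i advanced while the current diff is in band
def pvFirstBad (lo hi : Int) : List Int → Nat
  | [] => 0
  | x :: t => if pvOk lo hi x then pvFirstBad lo hi t + 1 else 0

def pvDampened (d : List Int) (lo hi : Int) : Bool :=
  let i := pvFirstBad lo hi d
  if i = d.length then true
  else
    let c1 := (decide (i = 0) || pvOk lo hi (PySem.List.pyGetD d ((i : Int) - 1) 0 + PySem.List.pyGetD d (i : Int) 0))
              && (PySem.List.slice d (some ((i : Int) + 1)) none).all (pvOk lo hi)
    let c2 := decide (i = d.length - 1)
              || (pvOk lo hi (PySem.List.pyGetD d (i : Int) 0 + PySem.List.pyGetD d ((i : Int) + 1) 0)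
                  && (PySem.List.slice d (some ((i : Int) + 2)) none).all (pvOk lo hi))
    c1 || c2

def pvDiffs (report : List Int) : List Int :=
  (report.zip (PySem.List.slice report (some 1) none)).map (fun p => p.2 - p.1)

def is_safe2_alt (report : List Int) : Bool :=
  let d := pvDiffs report
  pvDampened d 1 3 || pvDampened d (-3) (-1)

-- ===== PRECONDITION & SPEC =====
-- Pre_ excludes only the empty list, on which A raises IndexError (a[0] in is_dec_or_inc).
def Pre_is_safe2 (report : List Int) : Prop := report ≠ []
instance (report : List Int) : Decidable (Pre_is_safe2 report) := by unfold Pre_is_safe2; infer_instance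
def pvWitness_is_safe2 : List Int := [1, 2, 8]

def Spec_is_safe2 (report : List Int) (out : Bool) : Prop := out = is_safe2_alt report
instance (report : List Int) (out : Bool) : Decidable (Spec_is_safe2 report out) := by unfold Spec_is_safe2; infer_instance

-- ===== CLAIM (what is proved, stated in full; the proofs are below) =====
def Claim_equal_is_safe2 : Prop := ∀ (report : List Int), Dom_is_safe2 report → Pre_is_safe2 report → Spec_is_safe2 report (is_safe2 report)

-- ===== LEMMAS AND PROOFS =====

def AbsOk (x : Int) : Prop := (1 ≤ x ∧ x ≤ 3) ∨ (-3 ≤ x ∧ x ≤ -1)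

def dif : List Int → List Int
  | [] => []
  | [_] => []
  | x :: y :: t => (y - x) :: dif (y :: t)

lemma dif_short (l : List Int) (h : l.length ≤ 1) : dif l = [] := by
  match l, h with
  | [], _ => rfl
  | [_], _ => rfl

lemma dist_absOk (x y : Int) : ((pvDistance x y > 3 ∨ pvDistance x y < 1) ↔ ¬ AbsOk (y - x)) := by
  unfold pvDistance AbsOk; split_ifs <;> omega

lemma safeLoop_eq (a : List Int) (k : Nat) (hk : 1 ≤ k) :
    (pvSafeLoop a (PySem.List.pyRange k a.length 1) = true ↔ ∀ x ∈ dif (a.drop (k-1)), AbsOk x) := by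
  by_cases h : k < a.length
  · rw [PySem.List.pyRange_one_cons (by exact_mod_cast h)]
    have h1 : k - 1 < a.length := by omega
    have h2 : k < a.length := h
    have hd1 : a.drop (k-1) = a[k-1] :: a.drop k := by
      have := List.drop_eq_getElem_cons h1
      rwa [show k - 1 + 1 = k by omega] at this
    have hd2 : a.drop k = a[k] :: a.drop (k+1) := List.drop_eq_getElem_cons h2
    have hget1 : PySem.List.pyGetD a ((k:Int) - 1) 0 = a[k-1] := by
      have : ((k:Int) - 1) = ((k-1 : Nat) : Int) := by omega
      rw [this, PySem.List.pyGetD_natCast]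
      exact List.getD_eq_getElem a 0 h1
    have hget2 : PySem.List.pyGetD a (k:Int) 0 = a[k] := by
      rw [PySem.List.pyGetD_natCast]
      exact List.getD_eq_getElem a 0 h2
    have hcast : (k : Int) + 1 = ((k+1 : Nat) : Int) := by push_cast; ring
    have ih := safeLoop_eq a (k+1) (by omega)
    unfold pvSafeLoop
    rw [hd1, hd2]
    simp only [dif, hget1, hget2, hcast]
    have hne : ¬ ((k : Int) = (a.length : Int)) := by omega
    simp only [if_neg hne]
    by_cases hb : pvDistance a[k-1] a[k] > 3 ∨ pvDistance a[k-1] a[k] < 1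
    · have : (pvDistance a[k-1] a[k] > 3 || pvDistance a[k-1] a[k] < 1) = true := by
        simpa [decide_eq_true_iff] using hb
      simp only [this, if_true]
      constructor
      · intro hfalse; exact absurd hfalse (by simp)
      · intro hall
        exact absurd (hall _ (by simp [hd2.symm])) ((dist_absOk _ _).mp hb)
    · have : (pvDistance a[k-1] a[k] > 3 || pvDistance a[k-1] a[k] < 1) = false := by
        simpa [decide_eq_true_iff] using hb
      simp only [this, Bool.false_eq_true, if_false]
      have habs : AbsOk (a[k] - a[k-1]) := not_not.mp (fun hc => hb ((dist_absOk _ _).mpr hc))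
      rw [ih, show k + 1 - 1 = k by omega, ← hd2]
      simp [List.forall_mem_cons, habs]
  · rw [PySem.List.pyRange_one_eq_nil (by exact_mod_cast (by omega : a.length ≤ k))]
    rw [dif_short _ (by simp; omega)]
    simp [pvSafeLoop]
termination_by a.length - k

def OkP (lo hi x : Int) : Prop := lo ≤ x ∧ x ≤ hi

def AllOk (lo hi : Int) (l : List Int) : Prop := ∀ x ∈ l, OkP lo hi x

def SafeP (a : List Int) : Prop := AllOk 1 3 (dif a) ∨ AllOk (-3) (-1) (dif a)

lemma dif_chain (P : Int → Prop) (a : List Int) :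
    (∀ x ∈ dif a, P x) ↔ List.IsChain (fun u v => P (v - u)) a := by
  induction a with
  | nil => simp [dif]
  | cons x t ih =>
    cases t with
    | nil => simp [dif]
    | cons y t' => simp [dif, List.isChain_cons_cons, ← ih]

lemma pairwise_of_allOk_pos (a : List Int) (h : ∀ x ∈ dif a, (0:Int) < x) :
    a.Pairwise (· < ·) := by
  have hc : List.IsChain (fun u v : Int => (0:Int) < v - u) a := (dif_chain _ a).mp h
  have hc2 : List.IsChain (fun u v : Int => u < v) a := hc.imp (fun h => by omega)
  exact List.isChain_iff_pairwise.mp hc2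

lemma pairwise_of_allOk_neg (a : List Int) (h : ∀ x ∈ dif a, x < (0:Int)) :
    a.Pairwise (· > ·) := by
  have hc : List.IsChain (fun u v : Int => v - u < 0) a := (dif_chain _ a).mp h
  have hc2 : List.IsChain (fun u v : Int => u > v) a := hc.imp (fun h => by omega)
  exact List.isChain_iff_pairwise.mp hc2

lemma allOk_nonneg_of_pairwise_le (a : List Int) (h : a.Pairwise (· ≤ ·)) :
    ∀ x ∈ dif a, (0:Int) ≤ x :=
  (dif_chain _ a).mpr ((h.isChain).imp (fun h => by omega))

lemma isSafe_iff (a : List Int) (h : a ≠ []) : pvIsSafe a = true ↔ SafeP a := by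
  have hloop := safeLoop_eq a 1 le_rfl
  simp only [Nat.sub_self, List.drop_zero] at hloop
  constructor
  · intro hs
    unfold pvIsSafe at hs
    by_cases hd : pvIsDecOrInc a = true
    swap
    · simp [hd] at hs
    simp only [hd, Bool.not_true, Bool.false_eq_true, if_false] at hs
    have habs := hloop.mp hs
    unfold pvIsDecOrInc at hd
    split_ifs at hd with hcmp
    · have hs' : a = PySem.List.sorted a (fun x => x) false := of_decide_eq_true hd
      have hpw : a.Pairwise (fun u v => u ≤ v) := by
        have := PySem.List.sorted_pairwise a (fun x => x)
        rwa [← hs'] at this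
      have hnn := allOk_nonneg_of_pairwise_le a hpw
      left; intro z hz
      have h1 := habs z hz; have h2 := hnn z hz
      unfold AbsOk at h1; unfold OkP; omega
    · have hs' : a = (PySem.List.sorted a (fun x => x) false).reverse := of_decide_eq_true hd
      have hsr : PySem.List.sorted a (fun x => x) false = a.reverse := by
        conv_rhs => rw [hs']
        rw [List.reverse_reverse]
      have hpw : a.Pairwise (fun u v => v ≤ u) := by
        have := PySem.List.sorted_pairwise a (fun x => x)
        rw [hsr] at this
        exact List.pairwise_reverse.mp this
      have hnp : ∀ x ∈ dif a, x ≤ (0:Int) :=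
        (dif_chain _ a).mpr ((hpw.isChain).imp (fun h => by omega))
      right; intro z hz
      have h1 := habs z hz; have h2 := hnp z hz
      unfold AbsOk at h1; unfold OkP; omega
  · intro hsafe
    have habs : ∀ x ∈ dif a, AbsOk x := by
      rcases hsafe with hu | hdn
      · intro z hz; have := hu z hz; unfold OkP at this; unfold AbsOk; omega
      · intro z hz; have := hdn z hz; unfold OkP at this; unfold AbsOk; omega
    have hdec : pvIsDecOrInc a = true := by
      obtain ⟨x, t, rfl⟩ := List.exists_cons_of_ne_nil h
      have hget0 : PySem.List.pyGetD (x :: t) 0 0 = x := PySem.List.pyGetD_zero_cons _ _ _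
      have hgetl : PySem.List.pyGetD (x :: t) (-1) 0 = (x :: t).getLast (by simp) :=
        PySem.List.pyGetD_neg_one _ _ _
      rcases hsafe with hu | hdn
      · have hpos : ∀ z ∈ dif (x :: t), (0:Int) < z := fun z hz => by
          have := hu z hz; unfold OkP at this; omega
        have hpw := pairwise_of_allOk_pos _ hpos
        have hsorted : PySem.List.sorted (x :: t) (fun x => x) false = x :: t :=
          PySem.List.sorted_eq_of_perm_of_pairwise_lt _ _ _ (List.Perm.refl _) hpw
        unfold pvIsDecOrInc
        rcases List.eq_nil_or_concat' t with rfl | ⟨t', y, rfl⟩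
        · rw [hget0, hgetl]
          simp [hsorted]
        · have hlast : (x :: (t' ++ [y])).getLast (by simp) = y := by
            simp [List.getLast_concat]
          have hmem : y ∈ t' ++ [y] := by simp
          have hlt : x < y := (List.pairwise_cons.mp hpw).1 _ hmem
          rw [hget0, hgetl, hlast, if_pos hlt]
          exact decide_eq_true hsorted.symm
      · have hneg : ∀ z ∈ dif (x :: t), z < (0:Int) := fun z hz => by
          have := hdn z hz; unfold OkP at this; omega
        have hpw := pairwise_of_allOk_neg _ hneg
        have hpwr : (x :: t).reverse.Pairwise (· < ·) := by
          rw [List.pairwise_reverse]; exact hpw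
        have hsorted : PySem.List.sorted (x :: t) (fun x => x) false = (x :: t).reverse :=
          PySem.List.sorted_eq_of_perm_of_pairwise_lt _ _ _ (List.reverse_perm _) hpwr
        unfold pvIsDecOrInc
        rcases List.eq_nil_or_concat' t with rfl | ⟨t', y, rfl⟩
        · rw [hget0, hgetl]
          simp [hsorted]
        · have hlast : (x :: (t' ++ [y])).getLast (by simp) = y := by
            simp [List.getLast_concat]
          have hmem : y ∈ t' ++ [y] := by simp
          have hgt : y < x := (List.pairwise_cons.mp hpw).1 _ hmem
          rw [hget0, hgetl, hlast, if_neg (by omega)]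
          refine decide_eq_true ?_
          rw [hsorted, List.reverse_reverse]
    unfold pvIsSafe
    simp only [hdec, Bool.not_true, Bool.false_eq_true, if_false]
    exact hloop.mpr habs

def remAt (j : Nat) (a : List Int) : List Int := a.take j ++ a.drop (j + 1)

lemma length_dif (a : List Int) : (dif a).length = a.length - 1 := by
  induction a with
  | nil => rfl
  | cons x t ih =>
    cases t with
    | nil => rfl
    | cons y t' => simp [dif] at *; omega

lemma safe2Loop_any (a : List Int) (l : List Int) :
    pvSafe2Loop a l = true ↔ ∃ i ∈ l,
      pvIsSafe (PySem.List.slice a none (some i) ++ PySem.List.slice a (some (i + 1)) none) = true := by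
  induction l with
  | nil => simp [pvSafe2Loop]
  | cons i rest ih =>
    unfold pvSafe2Loop
    split_ifs with hi
    · simp [hi]
    · simp only [ih, List.mem_cons]
      constructor
      · rintro ⟨j, hj, hjs⟩; exact ⟨j, Or.inr hj, hjs⟩
      · rintro ⟨j, hj | hj, hjs⟩
        · exact absurd (hj ▸ hjs) hi
        · exact ⟨j, hj, hjs⟩

lemma slice_remAt (a : List Int) (j : Nat) :
    PySem.List.slice a none (some (j : Int)) ++ PySem.List.slice a (some ((j : Int) + 1)) none = remAt j a := by
  rw [PySem.List.slice_to_natCast, show ((j : Int) + 1) = ((j + 1 : Nat) : Int) by push_cast; ring,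
    PySem.List.slice_from_natCast]
  rfl

lemma isSafe2_iff (a : List Int) (h : a ≠ []) :
    is_safe2 a = true ↔ SafeP a ∨ ∃ j < a.length, SafeP (remAt j a) := by
  unfold is_safe2
  by_cases hs : pvIsSafe a = true
  · simp only [hs, if_true, true_iff]
    exact Or.inl ((isSafe_iff a h).mp hs)
  · have hlen : 2 ≤ a.length := by
      rcases a with _ | ⟨x, t⟩
      · exact absurd rfl h
      rcases t with _ | _
      · exact absurd ((isSafe_iff _ h).mpr (Or.inl (by intro z hz; simp [dif] at hz))) hs
      · simp
    rw [if_neg hs, safe2Loop_any]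
    have hAna : ¬ SafeP a := fun hc => hs ((isSafe_iff a h).mpr hc)
    constructor
    · rintro ⟨i, hi, his⟩
      rw [PySem.List.mem_pyRange_one] at hi
      obtain ⟨hi0, hilen⟩ := hi
      have hij : i = ((i.toNat : Nat) : Int) := by omega
      rw [hij, slice_remAt] at his
      have hjlen : i.toNat < a.length := by omega
      have hne : remAt i.toNat a ≠ [] := by
        have : (remAt i.toNat a).length = a.length - 1 := by
          unfold remAt; simp; omega
        intro hc; rw [hc] at this; simp at this; omega
      exact Or.inr ⟨i.toNat, hjlen, (isSafe_iff _ hne).mp his⟩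
    · rintro (hc | ⟨j, hj, hjs⟩)
      · exact absurd hc hAna
      · have hne : remAt j a ≠ [] := by
          have : (remAt j a).length = a.length - 1 := by
            unfold remAt; simp; omega
          intro hc; rw [hc] at this; simp at this; omega
        refine ⟨(j : Int), ?_, ?_⟩
        · rw [PySem.List.mem_pyRange_one]; constructor <;> [positivity; exact_mod_cast hj]
        · rw [slice_remAt]; exact (isSafe_iff _ hne).mpr hjs

lemma dif_tail (a : List Int) : dif a.tail = (dif a).tail := by
  rcases a with _ | ⟨x, t⟩
  · rfl
  rcases t with _ | ⟨y, t'⟩ <;> rfl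

lemma dif_drop (a : List Int) (k : Nat) : dif (a.drop k) = (dif a).drop k := by
  induction k generalizing a with
  | zero => rfl
  | succ k ih =>
    rw [← List.tail_drop, dif_tail, ih, List.tail_drop]

lemma dif_take (a : List Int) (k : Nat) (hk : 1 ≤ k) : dif (a.take k) = (dif a).take (k - 1) := by
  induction a generalizing k with
  | nil => simp [dif]
  | cons x t ih =>
    rcases t with _ | ⟨y, t'⟩
    · cases k <;> simp [dif]
    · match k, hk with
      | 1, _ => simp [dif]
      | (k+2), _ =>
        have h2 := ih (k+1) (by omega)
        simp only [List.take_succ_cons, dif, Nat.add_sub_cancel] at h2 ⊢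
        rw [h2, show k+2-1 = k+1 by omega, List.take_succ_cons]

lemma dif_getD (a : List Int) (k : Nat) (hk : k + 1 < a.length) :
    (dif a).getD k 0 = a.getD (k+1) 0 - a.getD k 0 := by
  induction a generalizing k with
  | nil => simp at hk
  | cons x t ih =>
    rcases t with _ | ⟨y, t'⟩
    · simp at hk
    · rcases k with _ | k
      · simp [dif]
      · have := ih k (by simpa using (by simp at hk; omega))
        simpa [dif] using this

lemma dif_append (u v : List Int) (hu : u ≠ []) (hv : v ≠ []) :
    dif (u ++ v) = dif u ++ (v.getD 0 0 - u.getD (u.length - 1) 0) :: dif v := by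
  induction u with
  | nil => exact absurd rfl hu
  | cons x t ih =>
    rcases t with _ | ⟨y, t'⟩
    · rcases v with _ | ⟨z, w⟩
      · exact absurd rfl hv
      · simp [dif]
    · have := ih (by simp)
      simp only [List.cons_append, dif] at *
      rw [this]
      simp only [List.getD_cons_succ, List.length_cons, Nat.add_sub_cancel]

lemma pvOk_iff (lo hi x : Int) : pvOk lo hi x = true ↔ OkP lo hi x := by
  simp [pvOk, OkP]

lemma dif_remAt_zero (a : List Int) : dif (remAt 0 a) = (dif a).tail := by
  unfold remAt
  rw [List.take_zero, List.nil_append, show (0+1) = 1 from rfl, List.drop_one, dif_tail]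

lemma dif_remAt_last (a : List Int) (h : 1 ≤ a.length) :
    dif (remAt (a.length - 1) a) = (dif a).dropLast := by
  unfold remAt
  rw [show a.length - 1 + 1 = a.length by omega, List.drop_length, List.append_nil]
  rcases Nat.lt_or_ge a.length 2 with h2 | h2
  · have h1' : a.length = 1 := by omega
    rw [dif_short (a.take (a.length - 1)) (by simp; omega), List.dropLast_eq_take, length_dif, h1']
    simp
  · rw [dif_take a (a.length - 1) (by omega), List.dropLast_eq_take, length_dif]

lemma dif_remAt_mid (a : List Int) (j : Nat) (h1 : 1 ≤ j) (h2 : j + 1 < a.length) :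
    dif (remAt j a) = (dif a).take (j-1) ++
      ((dif a).getD (j-1) 0 + (dif a).getD j 0) :: (dif a).drop (j+1) := by
  have hlu0 : (a.take j).length = j := by simp; omega
  have hu : a.take j ≠ [] := by
    intro hc
    rw [hc] at hlu0
    simp at hlu0
    omega
  have hv : a.drop (j+1) ≠ [] := by
    intro hc
    have := congrArg List.length hc
    rw [List.length_drop] at this
    simp at this
    omega
  have hlu : (a.take j).length = j := by simp; omega
  unfold remAt
  rw [dif_append _ _ hu hv, dif_take a j h1, dif_drop]
  congr 1
  congr 1
  have e1 : (a.drop (j+1)).getD 0 0 = a.getD (j+1) 0 := by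
    simp only [List.getD_eq_getElem?_getD, List.getElem?_drop, add_zero]
  have e2 : (a.take j).getD ((a.take j).length - 1) 0 = a.getD (j-1) 0 := by
    rw [hlu]
    simp only [List.getD_eq_getElem?_getD, List.getElem?_take_of_lt (by omega : j - 1 < j)]
  have e3 := dif_getD a (j-1) (by omega)
  rw [show j - 1 + 1 = j by omega] at e3
  rw [e1, e2, e3, dif_getD a j (by omega)]
  ring

lemma firstBad_le (lo hi : Int) (d : List Int) : pvFirstBad lo hi d ≤ d.length := by
  induction d with
  | nil => simp [pvFirstBad]
  | cons x t ih => unfold pvFirstBad; split_ifs <;> simp <;> omega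

lemma firstBad_eq_length_iff (lo hi : Int) (d : List Int) :
    pvFirstBad lo hi d = d.length ↔ AllOk lo hi d := by
  induction d with
  | nil => simp [pvFirstBad, AllOk]
  | cons x t ih =>
    unfold pvFirstBad
    split_ifs with hx
    · simp only [List.length_cons, Nat.add_right_cancel_iff, ih]
      unfold AllOk
      simp [List.forall_mem_cons, (pvOk_iff lo hi x).mp hx]
    · simp only [List.length_cons]
      constructor
      · intro hc; omega
      · intro hall
        exact absurd ((pvOk_iff lo hi x).mpr (hall x (by simp))) hx

lemma firstBad_spec (lo hi : Int) (d : List Int) (h : pvFirstBad lo hi d < d.length) :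
    ¬ OkP lo hi (d.getD (pvFirstBad lo hi d) 0) ∧
      ∀ k < pvFirstBad lo hi d, OkP lo hi (d.getD k 0) := by
  induction d with
  | nil => simp [pvFirstBad] at h
  | cons x t ih =>
    unfold pvFirstBad at h ⊢
    split_ifs at h ⊢ with hx
    · have := ih (by simpa using (by simp at h; omega))
      refine ⟨by simpa using this.1, ?_⟩
      intro k hk
      rcases k with _ | k
      · simpa using (pvOk_iff lo hi x).mp hx
      · simpa using this.2 k (by omega)
    · refine ⟨by simpa using fun hc => hx ((pvOk_iff lo hi x).mpr hc), by omega⟩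

lemma getElem_mem_drop (d : List Int) (k i : Nat) (hk : k ≤ i) (hi : i < d.length) :
    d[i] ∈ d.drop k := by
  refine List.mem_iff_getElem?.mpr ⟨i - k, ?_⟩
  rw [List.getElem?_drop, show k + (i - k) = i by omega, List.getElem?_eq_getElem hi]

lemma getElem_mem_take (d : List Int) (k i : Nat) (hk : i < k) (hi : i < d.length) :
    d[i] ∈ d.take k := by
  refine List.mem_iff_getElem?.mpr ⟨i, ?_⟩
  rw [List.getElem?_take_of_lt hk, List.getElem?_eq_getElem hi]

lemma dampened_iff (a : List Int) (lo hi : Int) (h : a ≠ []) :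
    pvDampened (dif a) lo hi = true ↔
      AllOk lo hi (dif a) ∨ ∃ j < a.length, AllOk lo hi (dif (remAt j a)) := by
  have hn1 : 1 ≤ a.length := List.length_pos_of_ne_nil h
  have hm : (dif a).length = a.length - 1 := length_dif a
  by_cases hil : pvFirstBad lo hi (dif a) = (dif a).length
  · have hall : AllOk lo hi (dif a) := (firstBad_eq_length_iff _ _ _).mp hil
    have hL : pvDampened (dif a) lo hi = true := by simp [pvDampened, hil]
    rw [hL]
    exact iff_of_true rfl (Or.inl hall)
  · obtain ⟨i, hidef⟩ : ∃ k, pvFirstBad lo hi (dif a) = k := ⟨_, rfl⟩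
    rw [hidef] at hil
    have hlt : i < (dif a).length := lt_of_le_of_ne (hidef ▸ firstBad_le lo hi (dif a)) hil
    obtain ⟨hbad, hpre⟩ := firstBad_spec lo hi (dif a) (hidef ▸ hlt)
    rw [hidef] at hbad hpre
    rw [List.getD_eq_getElem _ _ hlt] at hbad
    have hnotall : ¬ AllOk lo hi (dif a) := fun hc => hil (hidef ▸ (firstBad_eq_length_iff lo hi (dif a)).mpr hc)
    have hn2 : 2 ≤ a.length := by omega
    have hpre' : ∀ (k : Nat) (hk2 : k < i), OkP lo hi ((dif a)[k]'(by omega)) := by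
      intro k hk
      have := hpre k hk
      rwa [List.getD_eq_getElem _ _ (by omega)] at this
    have hgoal : pvDampened (dif a) lo hi =
        (((decide (i = 0) || pvOk lo hi (PySem.List.pyGetD (dif a) ((i : Int) - 1) 0 + PySem.List.pyGetD (dif a) (i : Int) 0))
              && ((dif a).drop (i+1)).all (pvOk lo hi)) ||
         (decide (i = (dif a).length - 1)
              || (pvOk lo hi (PySem.List.pyGetD (dif a) (i : Int) 0 + PySem.List.pyGetD (dif a) ((i : Int) + 1) 0)
                  && ((dif a).drop (i+2)).all (pvOk lo hi)))) := by
      have hs1 : PySem.List.slice (dif a) (some ((i : Int) + 1)) none = (dif a).drop (i + 1) := by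
        rw [show ((i : Int) + 1) = ((i + 1 : Nat) : Int) by push_cast; ring, PySem.List.slice_from_natCast]
      have hs2 : PySem.List.slice (dif a) (some ((i : Int) + 2)) none = (dif a).drop (i + 2) := by
        rw [show ((i : Int) + 2) = ((i + 2 : Nat) : Int) by push_cast; ring, PySem.List.slice_from_natCast]
      simp only [pvDampened, hidef, hs1, hs2, if_neg hil]
    rw [hgoal]
    -- c1 characterisation
    have keyc1 : ((decide (i = 0) || pvOk lo hi (PySem.List.pyGetD (dif a) ((i : Int) - 1) 0 + PySem.List.pyGetD (dif a) (i : Int) 0))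
              && ((dif a).drop (i+1)).all (pvOk lo hi)) = true
        ↔ AllOk lo hi (dif (remAt i a)) := by
      by_cases hi0 : i = 0
      · subst hi0
        rw [dif_remAt_zero, ← List.drop_one]
        simp [AllOk, pvOk_iff]
      · have hmid := dif_remAt_mid a i (by omega) (by omega)
        rw [hmid]
        have hg1 : PySem.List.pyGetD (dif a) ((i : Int) - 1) 0 = (dif a).getD (i-1) 0 := by
          rw [show ((i : Int) - 1) = ((i - 1 : Nat) : Int) by omega, PySem.List.pyGetD_natCast]
        have hg2 : PySem.List.pyGetD (dif a) (i : Int) 0 = (dif a).getD i 0 := PySem.List.pyGetD_natCast _ _ _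
        have htake : ∀ x ∈ (dif a).take (i-1), OkP lo hi x := by
          intro x hx
          obtain ⟨k, hk, hkx⟩ := List.getElem_of_mem hx
          have hkl : k < i - 1 := by rw [List.length_take] at hk; omega
          rw [← hkx, List.getElem_take]
          exact hpre' k (by omega)
        simp only [hg1, hg2, hi0, decide_false, Bool.false_or, Bool.and_eq_true, List.all_eq_true,
          pvOk_iff, AllOk, List.mem_append, List.mem_cons]
        constructor
        · rintro ⟨hmerge, hdrop⟩ x hx
          rcases hx with hx | hx | hx
          · exact htake x hx
          · rw [hx]; exact hmerge
          · exact hdrop x hx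
        · intro hall
          exact ⟨hall _ (Or.inr (Or.inl rfl)), fun x hx => hall x (Or.inr (Or.inr hx))⟩
    -- c2 characterisation
    have keyc2 : (decide (i = (dif a).length - 1)
              || (pvOk lo hi (PySem.List.pyGetD (dif a) (i : Int) 0 + PySem.List.pyGetD (dif a) ((i : Int) + 1) 0)
                  && ((dif a).drop (i+2)).all (pvOk lo hi))) = true
        ↔ AllOk lo hi (dif (remAt (i+1) a)) := by
      by_cases hilast : i = (dif a).length - 1
      · have hj : i + 1 = a.length - 1 := by omega
        rw [hj, dif_remAt_last a (by omega)]
        have hdl : AllOk lo hi (dif a).dropLast := by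
          intro x hx
          rw [List.dropLast_eq_take] at hx
          obtain ⟨k, hk, hkx⟩ := List.getElem_of_mem hx
          have hkl : k < (dif a).length - 1 := by rw [List.length_take] at hk; omega
          rw [← hkx, List.getElem_take]
          exact hpre' k (by omega)
        simp [hilast, hdl]
      · have hmid := dif_remAt_mid a (i+1) (by omega) (by omega)
        rw [hmid]
        have hg2 : PySem.List.pyGetD (dif a) (i : Int) 0 = (dif a).getD i 0 := PySem.List.pyGetD_natCast _ _ _
        have hg3 : PySem.List.pyGetD (dif a) ((i : Int) + 1) 0 = (dif a).getD (i+1) 0 := by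
          rw [show ((i : Int) + 1) = ((i + 1 : Nat) : Int) by push_cast; ring, PySem.List.pyGetD_natCast]
        have htake : ∀ x ∈ (dif a).take (i+1-1), OkP lo hi x := by
          intro x hx
          obtain ⟨k, hk, hkx⟩ := List.getElem_of_mem hx
          have hkl : k < i + 1 - 1 := by rw [List.length_take] at hk; omega
          rw [← hkx, List.getElem_take]
          exact hpre' k (by omega)
        simp only [hg2, hg3, hilast, decide_false, Bool.false_or, Bool.and_eq_true, List.all_eq_true,
          pvOk_iff, AllOk, List.mem_append, List.mem_cons]
        rw [show i + 1 - 1 = i by omega, show i + 1 + 1 = i + 2 by omega]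
        constructor
        · rintro ⟨hmerge, hdrop⟩ x hx
          rcases hx with hx | hx | hx
          · exact htake x (by rw [show i + 1 - 1 = i by omega]; exact hx)
          · rw [hx]; exact hmerge
          · exact hdrop x hx
        · intro hall
          exact ⟨hall _ (Or.inr (Or.inl rfl)), fun x hx => hall x (Or.inr (Or.inr hx))⟩
    -- no other removal can work
    have keyother : ∀ j, j < a.length → j ≠ i → j ≠ i + 1 → ¬ AllOk lo hi (dif (remAt j a)) := by
      intro j hj hji hji1 hc
      have hdibad : (dif a)[i] ∈ dif (remAt j a) → False := fun hmem => hbad (hc _ hmem)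
      rcases Nat.lt_or_ge j i with hlt' | hge
      · -- j < i : d[i] survives in the dropped part
        rcases Nat.eq_zero_or_pos j with rfl | hj1
        · apply hdibad
          rw [dif_remAt_zero, ← List.drop_one]
          exact getElem_mem_drop _ 1 i (by omega) hlt
        · apply hdibad
          rw [dif_remAt_mid a j (by omega) (by omega)]
          exact List.mem_append_right _ (List.mem_cons_of_mem _ (getElem_mem_drop _ (j+1) i (by omega) hlt))
      · have hge2 : i + 2 ≤ j := by omega
        rcases Nat.lt_or_ge j (a.length - 1) with hjn | hjn
        · apply hdibad
          rw [dif_remAt_mid a j (by omega) (by omega)]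
          exact List.mem_append_left _ (getElem_mem_take _ (j-1) i (by omega) hlt)
        · have hjeq : j = a.length - 1 := by omega
          apply hdibad
          rw [hjeq, dif_remAt_last a (by omega), List.dropLast_eq_take]
          exact getElem_mem_take _ ((dif a).length - 1) i (by omega) hlt
    -- combine
    constructor
    · intro hb
      rcases (Bool.or_eq_true _ _).mp hb with h1 | h2
      · exact Or.inr ⟨i, by omega, keyc1.mp h1⟩
      · exact Or.inr ⟨i+1, by omega, keyc2.mp h2⟩
    · rintro (hc | ⟨j, hj, hallj⟩)
      · exact absurd hc hnotall
      · by_cases hji : j = i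
        · subst hji
          exact (Bool.or_eq_true _ _).mpr (Or.inl (keyc1.mpr hallj))
        · by_cases hji1 : j = i + 1
          · subst hji1
            exact (Bool.or_eq_true _ _).mpr (Or.inr (keyc2.mpr hallj))
          · exact absurd hallj (keyother j hj hji hji1)

lemma pvDiffs_eq (a : List Int) : pvDiffs a = dif a := by
  unfold pvDiffs
  rw [PySem.List.slice_from_one]
  induction a with
  | nil => rfl
  | cons x t ih =>
    cases t with
    | nil => rfl
    | cons y t' => simp [dif, List.zip, ← ih]

theorem main (report : List Int) (h : report ≠ []) : is_safe2 report = is_safe2_alt report := by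
  rw [Bool.eq_iff_iff, isSafe2_iff report h]
  unfold is_safe2_alt
  simp only [pvDiffs_eq]
  rw [Bool.or_eq_true _ _, dampened_iff report 1 3 h, dampened_iff report (-3) (-1) h]
  unfold SafeP
  constructor
  · rintro ((hA | hB) | ⟨j, hj, hA | hB⟩)
    · exact Or.inl (Or.inl hA)
    · exact Or.inr (Or.inl hB)
    · exact Or.inl (Or.inr ⟨j, hj, hA⟩)
    · exact Or.inr (Or.inr ⟨j, hj, hB⟩)
  · rintro ((hA | ⟨j, hj, hA⟩) | (hB | ⟨j, hj, hB⟩))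
    · exact Or.inl (Or.inl hA)
    · exact Or.inr ⟨j, hj, Or.inl hA⟩
    · exact Or.inl (Or.inr hB)
    · exact Or.inr ⟨j, hj, Or.inr hB⟩

-- ===== VERDICT (by name: the statement is the Claim_ definition above) =====
theorem is_safe2_spec : Claim_equal_is_safe2 := by
  intro report _ hpre
  unfold Spec_is_safe2
  exact main report hpre
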